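-- pv_equiv track=rewrite | github.com/wkriigel/x987-app | x987/pipeline/transform.py | _top5_detect
-- ===== SOURCE A (Python) =====
-- TOP5 = [
--     "sport chrono", "pasm", "pse", "sport exhaust",
--     "limited slip", "lsd", "sport seats", "adaptive sport seats"
-- ]
--
-- def _top5_detect(raw_options: list[str]):
--     present = set()
--     raw = " | ".join([o.lower() for o in (raw_options or [])])
--     for key in TOP5:
--         if key in raw:
--             if "sport exhaust" in key or "pse" in key:
--                 present.add("PSE")
--             elif "limited slip" in key or "lsd" in key:
--                 present.add("LSD")
--             elif "sport chrono" in key: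
--                 present.add("Sport Chrono")
--             elif "pasm" in key:
--                 present.add("PASM")
--             elif "sport seats" in key:
--                 present.add("Sport Seats")
--     return sorted(present)
-- ===== SOURCE B (Python) =====
-- GROUPS = [
--     ("LSD", ["limited slip", "lsd"]),
--     ("PASM", ["pasm"]),
--     ("PSE", ["pse", "sport exhaust"]),
--     ("Sport Chrono", ["sport chrono"]),
--     ("Sport Seats", ["sport seats"]),
-- ]
--
-- def _top5_detect(raw_options: list[str]):
--     lowered = [o.lower() for o in raw_options]
--     return [label for label, keys in GROUPS
--             if any(k in o for k in keys for o in lowered)]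
-- ===== Notes on version B (the rewrite author's own statement) =====
-- stated objective: simpler
-- what changed: B drops A's join-into-one-string / per-keyword classification / set / sort pipeline: it maps each canonical label to its trigger keywords and emits labels directly in sorted order by scanning the lowered options per label, with no joined string, no set and no final sort.
import Mathlib
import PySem

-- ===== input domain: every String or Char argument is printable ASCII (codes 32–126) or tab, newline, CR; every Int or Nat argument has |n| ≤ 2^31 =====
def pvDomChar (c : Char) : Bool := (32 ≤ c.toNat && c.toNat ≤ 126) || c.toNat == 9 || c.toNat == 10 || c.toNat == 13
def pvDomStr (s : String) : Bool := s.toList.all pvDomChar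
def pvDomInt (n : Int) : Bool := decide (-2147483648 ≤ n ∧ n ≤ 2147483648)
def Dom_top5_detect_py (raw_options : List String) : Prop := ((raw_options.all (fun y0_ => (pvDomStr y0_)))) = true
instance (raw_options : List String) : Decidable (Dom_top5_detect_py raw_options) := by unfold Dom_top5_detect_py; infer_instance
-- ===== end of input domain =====

-- B replaces A's join-into-one-string + per-keyword classification + set + sort by a direct
-- label→keywords table scanned over the option list, emitting labels already in sorted order (simpler).

-- ===== PORT A =====
def TOP5 : List String :=
  ["sport chrono", "pasm", "pse", "sport exhaust",
   "limited slip", "lsd", "sport seats", "adaptive sport seats"]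

def top5_detect_py (raw_options : List String) : List String :=
  -- `raw_options or []`: a falsy (empty) list is replaced by []
  let base : List String := match raw_options with | [] => [] | xs => xs
  let raw := PySem.Str.join " | " (base.map PySem.Str.lower)
  let present := TOP5.foldl (fun present key =>
    if PySem.Str.isIn key raw then
      if PySem.Str.isIn "sport exhaust" key || PySem.Str.isIn "pse" key then
        PySem.Set.add present "PSE"
      else if PySem.Str.isIn "limited slip" key || PySem.Str.isIn "lsd" key then
        PySem.Set.add present "LSD"
      else if PySem.Str.isIn "sport chrono" key then
        PySem.Set.add present "Sport Chrono"
      else if PySem.Str.isIn "pasm" key then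
        PySem.Set.add present "PASM"
      else if PySem.Str.isIn "sport seats" key then
        PySem.Set.add present "Sport Seats"
      else present
    else present) (PySem.Set.empty)
  PySem.List.sorted present (fun x => x) false

-- ===== PORT B =====
def GROUPS : List (String × List String) :=
  [("LSD", ["limited slip", "lsd"]),
   ("PASM", ["pasm"]),
   ("PSE", ["pse", "sport exhaust"]),
   ("Sport Chrono", ["sport chrono"]),
   ("Sport Seats", ["sport seats"])]

def top5_detect_py_alt (raw_options : List String) : List String :=
  let lowered := raw_options.map PySem.Str.lower
  GROUPS.filterMap (fun g =>
    if g.2.any (fun k => lowered.any (fun o => PySem.Str.isIn k o)) then some g.1 else none)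

-- ===== PRECONDITION & SPEC =====
def Spec_top5_detect_py (raw_options : List String) (out : List String) : Prop := out = top5_detect_py_alt raw_options
instance (raw_options : List String) (out : List String) : Decidable (Spec_top5_detect_py raw_options out) := by unfold Spec_top5_detect_py; infer_instance

-- ===== CLAIM (what is proved, stated in full; the proofs are below) =====
def Claim_equal_top5_detect_py : Prop := ∀ (raw_options : List String), Dom_top5_detect_py raw_options → Spec_top5_detect_py raw_options (top5_detect_py raw_options)

-- ===== LEMMAS AND PROOFS =====

-- a pattern that cannot touch the separator " | ": nonempty, no '|', no leading/trailing space
def GoodPat (p : List Char) : Prop :=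
  p ≠ [] ∧ '|' ∉ p ∧ p.head? ≠ some ' ' ∧ p.getLast? ≠ some ' '

theorem prefix_part {p a b : List Char} (hbar : '|' ∉ p) (hlast : p.getLast? ≠ some ' ')
    (h : p <+: a ++ ' ' :: '|' :: ' ' :: b) : p <+: a := by
  rw [List.prefix_iff_eq_take] at h ⊢
  rcases Nat.lt_trichotomy p.length (a.length + 1) with hl | hl | hl
  · have hle : p.length ≤ a.length := by omega
    rw [List.take_append_of_le_length hle] at h
    exact h
  · exfalso
    apply hlast
    rw [hl, show a.length + 1 = a.length + 1 from rfl] at h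
    rw [List.take_length_add_append 1] at h
    simp only [List.take_succ_cons, List.take_zero] at h
    rw [h]
    exact List.getLast?_concat
  · exfalso
    apply hbar
    obtain ⟨k, hk⟩ : ∃ k, p.length = a.length + (k + 2) := ⟨p.length - a.length - 2, by omega⟩
    rw [hk, List.take_length_add_append (k + 2)] at h
    simp only [List.take_succ_cons] at h
    rw [h]
    simp

theorem mem_head_of_prefix {p : List Char} {c : Char} {l : List Char} (hp : p ≠ [])
    (h : p <+: c :: l) : c ∈ p := by
  cases p with
  | nil => exact absurd rfl hp
  | cons x xs => rw [List.cons_prefix_cons] at h; simp [h.1]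

theorem head?_of_prefix {p : List Char} {c : Char} {l : List Char} (hp : p ≠ [])
    (h : p <+: c :: l) : p.head? = some c := by
  cases p with
  | nil => exact absurd rfl hp
  | cons x xs => rw [List.cons_prefix_cons] at h; simp [h.1]

theorem infix_split {p b : List Char} (hg : GoodPat p) :
    ∀ a : List Char, (p <:+: a ++ ' ' :: '|' :: ' ' :: b ↔ p <:+: a ∨ p <:+: b) := by
  obtain ⟨hp, hbar, hhead, hlast⟩ := hg
  intro a
  induction a with
  | nil =>
    simp only [List.nil_append]
    constructor
    · intro h
      rw [List.infix_cons_iff] at h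
      rcases h with h | h
      · exact absurd (head?_of_prefix hp h) hhead
      rw [List.infix_cons_iff] at h
      rcases h with h | h
      · exact absurd (mem_head_of_prefix hp h) hbar
      rw [List.infix_cons_iff] at h
      rcases h with h | h
      · exact absurd (head?_of_prefix hp h) hhead
      · exact Or.inr h
    · intro h
      rcases h with h | h
      · rw [List.infix_nil] at h; exact absurd h hp
      · exact h.trans (List.suffix_append [' ', '|', ' '] b).isInfix
  | cons c a ih =>
    rw [List.cons_append]
    constructor
    · intro h
      rw [List.infix_cons_iff] at h
      rcases h with h | h
      · exact Or.inl (prefix_part hbar hlast (show p <+: (c :: a) ++ _ from h)).isInfix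
      · rcases ih.mp h with h | h
        · exact Or.inl (List.infix_cons h)
        · exact Or.inr h
    · intro h
      rcases h with h | h
      · exact h.trans (List.prefix_append (c :: a) (' ' :: '|' :: ' ' :: b)).isInfix
      · exact List.infix_cons (ih.mpr (Or.inr h))

theorem infix_join {p : List Char} (hg : GoodPat p) :
    ∀ xs : List (List Char), (p <:+: [' ', '|', ' '].intercalate xs ↔ ∃ x ∈ xs, p <:+: x) := by
  intro xs
  induction xs with
  | nil => simp [List.intercalate, List.infix_nil, hg.1]
  | cons x t ih =>
    cases t with
    | nil => simp [List.intercalate, List.intersperse]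
    | cons y t' =>
      have hstep : ([' ', '|', ' '] : List Char).intercalate (x :: y :: t')
          = x ++ ' ' :: '|' :: ' ' :: [' ', '|', ' '].intercalate (y :: t') := by
        simp [List.intercalate, List.intersperse]
      rw [hstep, infix_split hg x, ih]
      simp

-- `k in " | ".join(lowered)` equals `any(k in o for o in lowered)` for a GoodPat keyword
-- `k in " | ".join(lowered)` equals `any(k in o for o in lowered)` for a GoodPat keyword
theorem chars_bridge {k : String} (hg : GoodPat k.toList) (l : List String) :
    (PySem.Chars.isIn k.toList
        (PySem.Chars.join [' ', '|', ' '] (l.map (String.toList ∘ PySem.Str.lower))) = true)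
      ↔ ∃ x ∈ l, PySem.Chars.isIn k.toList (PySem.Chars.lower x.toList) = true := by
  rw [PySem.Chars.isIn_iff_infix]
  show _ <:+: List.intercalate [' ', '|', ' '] _ ↔ _
  rw [infix_join hg]
  simp [List.mem_map, PySem.Chars.isIn_iff_infix, PySem.Str.toList_lower]

theorem good_all : GoodPat ("sport chrono" : String).toList ∧ GoodPat ("pasm" : String).toList ∧
    GoodPat ("pse" : String).toList ∧ GoodPat ("sport exhaust" : String).toList ∧
    GoodPat ("limited slip" : String).toList ∧ GoodPat ("lsd" : String).toList ∧
    GoodPat ("sport seats" : String).toList ∧ GoodPat ("adaptive sport seats" : String).toList := by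
  unfold GoodPat
  refine ⟨⟨?_, ?_, ?_, ?_⟩, ⟨?_, ?_, ?_, ?_⟩, ⟨?_, ?_, ?_, ?_⟩, ⟨?_, ?_, ?_, ?_⟩,
    ⟨?_, ?_, ?_, ?_⟩, ⟨?_, ?_, ?_, ?_⟩, ⟨?_, ?_, ?_, ?_⟩, ⟨?_, ?_, ?_, ?_⟩⟩ <;> decide

-- an option containing "adaptive sport seats" also contains "sport seats"
theorem ass_ss_opt (cs : List Char) (h : PySem.Chars.isIn ("adaptive sport seats" : String).toList cs = true) :
    PySem.Chars.isIn ("sport seats" : String).toList cs = true := by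
  rw [PySem.Chars.isIn_iff_infix] at h ⊢
  exact List.IsInfix.trans (by decide) h

-- proof-side helpers: a name for A's joined string, its loop step, and the step's classification
def rawOf (l : List String) : String :=
  PySem.Str.join " | " ((match l with | [] => ([] : List String) | xs => xs).map PySem.Str.lower)

def classifyKey (k : String) : Option String :=
  if PySem.Str.isIn "sport exhaust" k || PySem.Str.isIn "pse" k then some "PSE"
  else if PySem.Str.isIn "limited slip" k || PySem.Str.isIn "lsd" k then some "LSD"
  else if PySem.Str.isIn "sport chrono" k then some "Sport Chrono"
  else if PySem.Str.isIn "pasm" k then some "PASM"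
  else if PySem.Str.isIn "sport seats" k then some "Sport Seats"
  else none

def astep (raw : String) (s : PySem.Set String) (k : String) : PySem.Set String :=
  if PySem.Str.isIn k raw then
    match classifyKey k with
    | some v => PySem.Set.add s v
    | none => s
  else s

theorem A_eq (l : List String) :
    top5_detect_py l
      = PySem.List.sorted (TOP5.foldl (astep (rawOf l)) PySem.Set.empty) (fun x => x) false := by
  simp only [top5_detect_py]
  refine congrArg (fun t => PySem.List.sorted t (fun x => x) false) ?_
  apply List.foldl_ext
  intro s k _
  show _ = astep (rawOf l) s k
  unfold astep classifyKey rawOf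
  split_ifs <;> rfl

theorem mem_astep (raw : String) (s : PySem.Set String) (k a : String) :
    a ∈ astep raw s k ↔ a ∈ s ∨ (PySem.Str.isIn k raw = true ∧ classifyKey k = some a) := by
  unfold astep
  split_ifs with h
  · cases hc : classifyKey k with
    | none => simp only [h, reduceCtorEq, and_false, or_false]
    | some v =>
      rw [PySem.Set.mem_add]
      simp only [h, true_and, Option.some.injEq]
      constructor
      · rintro (hs | rfl)
        · exact Or.inl hs
        · exact Or.inr rfl
      · rintro (hs | heq)
        · exact Or.inl hs
        · exact Or.inr heq.symm
  · simp only [h, Bool.false_eq_true, false_and, or_false]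

theorem mem_foldl_astep (raw a : String) :
    ∀ (ks : List String) (s : PySem.Set String),
      a ∈ ks.foldl (astep raw) s
        ↔ a ∈ s ∨ ∃ k ∈ ks, PySem.Str.isIn k raw = true ∧ classifyKey k = some a := by
  intro ks
  induction ks with
  | nil => simp
  | cons k ks ih =>
    intro s
    rw [List.foldl_cons, ih, mem_astep]
    simp only [List.mem_cons]
    constructor
    · rintro ((h | h) | ⟨k', hk', h⟩)
      · exact Or.inl h
      · exact Or.inr ⟨k, Or.inl rfl, h⟩
      · exact Or.inr ⟨k', Or.inr hk', h⟩
    · rintro (h | ⟨k', (rfl | hk'), h⟩)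
      · exact Or.inl (Or.inl h)
      · exact Or.inl (Or.inr h)
      · exact Or.inr ⟨k', hk', h⟩

theorem nodup_foldl_astep (raw : String) :
    ∀ (ks : List String) (s : PySem.Set String), s.Nodup → (ks.foldl (astep raw) s).Nodup := by
  intro ks
  induction ks with
  | nil => intro s hs; exact hs
  | cons k ks ih =>
    intro s hs
    rw [List.foldl_cons]
    apply ih
    unfold astep
    split_ifs
    · cases classifyKey k with
      | none => exact hs
      | some v => exact PySem.Set.nodup_add s v hs
    · exact hs

theorem filterMap_ite_sublist {α β : Type} (p : α → Bool) (f : α → β) :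
    ∀ gs : List α, (gs.filterMap (fun g => if p g then some (f g) else none)).Sublist (gs.map f) := by
  intro gs
  induction gs with
  | nil => simp
  | cons g gs ih =>
    simp only [List.filterMap_cons, List.map_cons]
    split_ifs
    · exact ih.cons₂ (f g)
    · exact ih.cons (f g)

theorem B_sublist (l : List String) :
    (top5_detect_py_alt l).Sublist (GROUPS.map Prod.fst) := by
  unfold top5_detect_py_alt
  exact filterMap_ite_sublist (fun g => g.2.any fun k => (l.map PySem.Str.lower).any fun o => PySem.Str.isIn k o) Prod.fst GROUPS

theorem B_pairwise (l : List String) : (top5_detect_py_alt l).Pairwise (· < ·) := by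
  apply List.Pairwise.sublist (B_sublist l)
  show (["LSD", "PASM", "PSE", "Sport Chrono", "Sport Seats"] : List String).Pairwise (· < ·)
  simp [List.pairwise_cons, String.lt_iff_toList_lt]
  refine ⟨?_, ?_, ?_, ?_⟩ <;> decide

theorem B_nodup (l : List String) : (top5_detect_py_alt l).Nodup := by
  exact (B_pairwise l).imp (fun h => ne_of_lt h)

-- ===== VERDICT (by name: the statement is the Claim_ definition above) =====
theorem top5_detect_py_spec : Claim_equal_top5_detect_py := by
  intro l _
  show top5_detect_py l = top5_detect_py_alt l
  have hraw : rawOf l = PySem.Str.join " | " (l.map PySem.Str.lower) := by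
    cases l <;> rfl
  rw [A_eq l]
  apply PySem.List.sorted_eq_of_perm_of_pairwise_lt _ _ _ ?_ ?_
  · -- permutation via same membership and Nodup on both sides
    rw [List.perm_ext_iff_of_nodup (B_nodup l) (nodup_foldl_astep (rawOf l) TOP5 PySem.Set.empty List.nodup_nil)]
    intro a
    obtain ⟨g1, g2, g3, g4, g5, g6, g7, g8⟩ := good_all
    rw [mem_foldl_astep]
    unfold top5_detect_py_alt GROUPS TOP5
    rw [hraw]
    have c1 : PySem.Chars.isIn ['s', 'p', 'o', 'r', 't', ' ', 'c', 'h', 'r', 'o', 'n', 'o']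
        (PySem.Chars.join [' ', '|', ' '] (List.map (String.toList ∘ PySem.Str.lower) l)) = true
        ↔ ∃ x ∈ l, PySem.Chars.isIn ['s', 'p', 'o', 'r', 't', ' ', 'c', 'h', 'r', 'o', 'n', 'o'] (PySem.Chars.lower x.toList) = true :=
      chars_bridge g1 l
    have c2 : PySem.Chars.isIn ['p', 'a', 's', 'm']
        (PySem.Chars.join [' ', '|', ' '] (List.map (String.toList ∘ PySem.Str.lower) l)) = true
        ↔ ∃ x ∈ l, PySem.Chars.isIn ['p', 'a', 's', 'm'] (PySem.Chars.lower x.toList) = true :=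
      chars_bridge g2 l
    have c3 : PySem.Chars.isIn ['p', 's', 'e']
        (PySem.Chars.join [' ', '|', ' '] (List.map (String.toList ∘ PySem.Str.lower) l)) = true
        ↔ ∃ x ∈ l, PySem.Chars.isIn ['p', 's', 'e'] (PySem.Chars.lower x.toList) = true :=
      chars_bridge g3 l
    have c4 : PySem.Chars.isIn ['s', 'p', 'o', 'r', 't', ' ', 'e', 'x', 'h', 'a', 'u', 's', 't']
        (PySem.Chars.join [' ', '|', ' '] (List.map (String.toList ∘ PySem.Str.lower) l)) = true
        ↔ ∃ x ∈ l, PySem.Chars.isIn ['s', 'p', 'o', 'r', 't', ' ', 'e', 'x', 'h', 'a', 'u', 's', 't'] (PySem.Chars.lower x.toList) = true :=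
      chars_bridge g4 l
    have c5 : PySem.Chars.isIn ['l', 'i', 'm', 'i', 't', 'e', 'd', ' ', 's', 'l', 'i', 'p']
        (PySem.Chars.join [' ', '|', ' '] (List.map (String.toList ∘ PySem.Str.lower) l)) = true
        ↔ ∃ x ∈ l, PySem.Chars.isIn ['l', 'i', 'm', 'i', 't', 'e', 'd', ' ', 's', 'l', 'i', 'p'] (PySem.Chars.lower x.toList) = true :=
      chars_bridge g5 l
    have c6 : PySem.Chars.isIn ['l', 's', 'd']
        (PySem.Chars.join [' ', '|', ' '] (List.map (String.toList ∘ PySem.Str.lower) l)) = true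
        ↔ ∃ x ∈ l, PySem.Chars.isIn ['l', 's', 'd'] (PySem.Chars.lower x.toList) = true :=
      chars_bridge g6 l
    have c7 : PySem.Chars.isIn ['s', 'p', 'o', 'r', 't', ' ', 's', 'e', 'a', 't', 's']
        (PySem.Chars.join [' ', '|', ' '] (List.map (String.toList ∘ PySem.Str.lower) l)) = true
        ↔ ∃ x ∈ l, PySem.Chars.isIn ['s', 'p', 'o', 'r', 't', ' ', 's', 'e', 'a', 't', 's'] (PySem.Chars.lower x.toList) = true :=
      chars_bridge g7 l
    have c8 : PySem.Chars.isIn ['a', 'd', 'a', 'p', 't', 'i', 'v', 'e', ' ', 's', 'p', 'o', 'r', 't', ' ', 's', 'e', 'a', 't', 's']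
        (PySem.Chars.join [' ', '|', ' '] (List.map (String.toList ∘ PySem.Str.lower) l)) = true
        ↔ ∃ x ∈ l, PySem.Chars.isIn ['a', 'd', 'a', 'p', 't', 'i', 'v', 'e', ' ', 's', 'p', 'o', 'r', 't', ' ', 's', 'e', 'a', 't', 's'] (PySem.Chars.lower x.toList) = true :=
      chars_bridge g8 l
    simp [List.mem_filterMap, Option.ite_none_right_eq_some,
      c1, c2, c3, c4, c5, c6, c7, c8,
      show classifyKey "sport chrono" = some "Sport Chrono" from by decide,
      show classifyKey "pasm" = some "PASM" from by decide,
      show classifyKey "pse" = some "PSE" from by decide,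
      show classifyKey "sport exhaust" = some "PSE" from by decide,
      show classifyKey "limited slip" = some "LSD" from by decide,
      show classifyKey "lsd" = some "LSD" from by decide,
      show classifyKey "sport seats" = some "Sport Seats" from by decide,
      show classifyKey "adaptive sport seats" = some "Sport Seats" from by decide]
    have himp : (∃ x ∈ l, PySem.Chars.isIn ("adaptive sport seats" : String).toList
          (PySem.Chars.lower x.toList) = true)
        → ∃ x ∈ l, PySem.Chars.isIn ("sport seats" : String).toList
          (PySem.Chars.lower x.toList) = true := by
      rintro ⟨x, hx, h⟩
      exact ⟨x, hx, ass_ss_opt _ h⟩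
    constructor
    · rintro (⟨h | h, rfl⟩ | ⟨h, rfl⟩ | ⟨h | h, rfl⟩ | ⟨h, rfl⟩ | ⟨h, rfl⟩)
      · exact Or.inr (Or.inr (Or.inr (Or.inr (Or.inl ⟨h, rfl⟩))))
      · exact Or.inr (Or.inr (Or.inr (Or.inr (Or.inr (Or.inl ⟨h, rfl⟩)))))
      · exact Or.inr (Or.inl ⟨h, rfl⟩)
      · exact Or.inr (Or.inr (Or.inl ⟨h, rfl⟩))
      · exact Or.inr (Or.inr (Or.inr (Or.inl ⟨h, rfl⟩)))
      · exact Or.inl ⟨h, rfl⟩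
      · exact Or.inr (Or.inr (Or.inr (Or.inr (Or.inr (Or.inr (Or.inl ⟨h, rfl⟩))))))
    · rintro (⟨h, rfl⟩ | ⟨h, rfl⟩ | ⟨h, rfl⟩ | ⟨h, rfl⟩ | ⟨h, rfl⟩ | ⟨h, rfl⟩ | ⟨h, rfl⟩ | ⟨h, rfl⟩)
      · exact Or.inr (Or.inr (Or.inr (Or.inl ⟨h, rfl⟩)))
      · exact Or.inr (Or.inl ⟨h, rfl⟩)
      · exact Or.inr (Or.inr (Or.inl ⟨Or.inl h, rfl⟩))
      · exact Or.inr (Or.inr (Or.inl ⟨Or.inr h, rfl⟩))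
      · exact Or.inl ⟨Or.inl h, rfl⟩
      · exact Or.inl ⟨Or.inr h, rfl⟩
      · exact Or.inr (Or.inr (Or.inr (Or.inr ⟨h, rfl⟩)))
      · exact Or.inr (Or.inr (Or.inr (Or.inr ⟨himp h, rfl⟩)))
  · exact B_pairwise l
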